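-- pv_equiv track=rewrite | github.com/eskfro/OSEBX-2 | src/analysis.py | forward_fill
-- ===== SOURCE A (Python) =====
-- def forward_fill(n, p):
--     start = n[0]
--     end = n[-1]
--
--     length = end - start + 1
--
--     n_vals = list(range(start, end + 1))
--     p_vals = [0] * length
--
--     # Fill in known values
--     for idx, element in enumerate(n):
--         p_vals[element - start] = p[idx]
--
--     last_value = None
--     for i in range(length):
--         if p_vals[i] != 0:
--             last_value = p_vals[i]
--         else:
--             if last_value is not None:
--                 p_vals[i] = last_value
--
--     return n_vals, p_vals
-- ===== SOURCE B (Python) =====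
-- def forward_fill(n, p):
--     start = n[0]
--     end = n[-1]
--
--     length = end - start + 1
--
--     n_vals = list(range(start, end + 1))
--     p_vals = [0] * length
--
--     # Fill in known values (same scatter as the original)
--     for idx, element in enumerate(n):
--         p_vals[element - start] = p[idx]
--
--     # Segment fill: each nonzero cell is an anchor; copy its value up to the next anchor.
--     anchors = [(i, v) for i, v in enumerate(p_vals) if v != 0]
--     bounds = [a for a, _ in anchors][1:] + [length]
--     filled = [0] * (anchors[0][0] if anchors else length)
--     for (a, v), nxt in zip(anchors, bounds):
--         filled += [v] * (nxt - a)
--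
--     return n_vals, filled
-- ===== Notes on version B (the rewrite author's own statement) =====
-- stated objective: alternative
-- what changed: A fills gaps with a per-cell carry-forward scan mutating p_vals in place; B instead collects the nonzero cells as an (index, value) anchor list and builds the output by emitting one constant segment per anchor up to the next anchor (leading region stays 0), keeping the same scatter step.
import Mathlib
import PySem

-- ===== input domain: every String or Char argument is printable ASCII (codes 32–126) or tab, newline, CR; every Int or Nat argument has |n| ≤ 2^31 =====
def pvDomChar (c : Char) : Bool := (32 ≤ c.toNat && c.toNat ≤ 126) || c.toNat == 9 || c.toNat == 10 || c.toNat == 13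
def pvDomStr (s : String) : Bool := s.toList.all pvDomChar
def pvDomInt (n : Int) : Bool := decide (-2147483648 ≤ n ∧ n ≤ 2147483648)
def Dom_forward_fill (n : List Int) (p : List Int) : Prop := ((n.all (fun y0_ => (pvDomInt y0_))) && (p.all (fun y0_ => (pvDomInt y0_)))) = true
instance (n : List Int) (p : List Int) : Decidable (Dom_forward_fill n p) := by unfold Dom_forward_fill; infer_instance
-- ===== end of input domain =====

-- B replaces A's per-cell carry-forward scan by an anchor/segment fill (same cost);
-- the equivalence proved is about the RETURN value on every input where A returns normally.

-- ===== PORT A =====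
def forward_fill (n : List Int) (p : List Int) : List Int × List Int :=
  match PySem.List.pyGet? n 0, PySem.List.pyGet? n (-1) with
  | some start, some e =>
    let length := e - start + 1
    let n_vals := PySem.List.pyRange start (e + 1) 1
    let p_vals : List Int := List.replicate length.toNat 0
    -- for idx, element in enumerate(n): p_vals[element - start] = p[idx]
    let p_vals := (PySem.List.enumerate n 0).foldl
      (fun pv ie => PySem.List.pySetD pv (ie.2 - start) (PySem.List.pyGetD p ie.1 0)) p_vals
    -- last_value = None; for i in range(length): carry last nonzero value forward
    let st := (PySem.List.pyRange 0 length 1).foldl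
      (fun (s : List Int × Option Int) i =>
        if PySem.List.pyGetD s.1 i 0 ≠ 0 then (s.1, some (PySem.List.pyGetD s.1 i 0))
        else match s.2 with
          | some lv => (PySem.List.pySetD s.1 i lv, s.2)
          | none => s)
      (p_vals, none)
    (n_vals, st.1)
  | _, _ => ([], [])   -- unreachable under Pre_ (n = []: Python raises IndexError)

-- ===== PORT B =====
def forward_fill_alt (n : List Int) (p : List Int) : List Int × List Int :=
  match PySem.List.pyGet? n 0 with
  | none => ([], [])   -- unreachable under Pre_ (n = []: Python raises IndexError)
  | some start =>
  match PySem.List.pyGet? n (-1) with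
  | none => ([], [])   -- unreachable under Pre_
  | some e =>
    let length := e - start + 1
    let n_vals := PySem.List.pyRange start (e + 1) 1
    let p_vals : List Int := List.replicate length.toNat 0
    -- same scatter as A (identical Python lines in Source B)
    let p_vals := (PySem.List.enumerate n 0).foldl
      (fun pv ie => PySem.List.pySetD pv (ie.2 - start) (PySem.List.pyGetD p ie.1 0)) p_vals
    -- anchors = [(i, v) for i, v in enumerate(p_vals) if v != 0]
    let anchors := (PySem.List.enumerate p_vals 0).filter (fun q => q.2 != 0)
    -- bounds = [a for a, _ in anchors][1:] + [length]
    let bounds := (anchors.map Prod.fst).drop 1 ++ [length]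
    -- filled = [0] * (anchors[0][0] if anchors else length)
    let filled : List Int := List.replicate
      (match anchors with | [] => length.toNat | q :: _ => q.1.toNat) 0
    -- for (a, v), nxt in zip(anchors, bounds): filled += [v] * (nxt - a)
    let filled := (anchors.zip bounds).foldl
      (fun acc qn => acc ++ List.replicate (qn.2 - qn.1.1).toNat qn.1.2) filled
    (n_vals, filled)

-- ===== PRECONDITION & SPEC =====
-- Pre_ = exactly the inputs on which Python A returns: n nonempty (else n[0] raises
-- IndexError), p at least as long as n (else p[idx] raises IndexError), and every
-- element within [2*n[0]-n[-1]-1, n[-1]], on which the scatter index element-n[0] is a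
-- valid (possibly negative, Python-wrapping) index into the length-(n[-1]-n[0]+1) list.
def Pre_forward_fill (n : List Int) (p : List Int) : Prop :=
  n ≠ [] ∧ n.length ≤ p.length ∧
  ∀ x ∈ n, n.headI - (n.getLastD 0 - n.headI + 1) ≤ x ∧ x ≤ n.getLastD 0
instance (n : List Int) (p : List Int) : Decidable (Pre_forward_fill n p) := by
  unfold Pre_forward_fill; infer_instance

def pvWitness_forward_fill : List Int × List Int := ([1, 3], [5, 0])

def Spec_forward_fill (n : List Int) (p : List Int) (out : List Int × List Int) : Prop := out = forward_fill_alt n p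
instance (n : List Int) (p : List Int) (out : List Int × List Int) : Decidable (Spec_forward_fill n p out) := by unfold Spec_forward_fill; infer_instance

-- ===== CLAIM (what is proved, stated in full; the proofs are below) =====
def Claim_equal_forward_fill : Prop := ∀ (n : List Int) (p : List Int), Dom_forward_fill n p → Pre_forward_fill n p → Spec_forward_fill n p (forward_fill n p)

-- ===== LEMMAS AND PROOFS =====

-- Reference forward fill (proof-only): carry `last` (0 = nothing seen yet) across the list.
def ffill (last : Int) : List Int → List Int
  | [] => []
  | x :: xs => if x = 0 then last :: ffill last xs else x :: ffill x xs

lemma ffill_cons_zero (last : Int) (xs : List Int) :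
    ffill last ((0 : Int) :: xs) = last :: ffill last xs := by rw [ffill]; norm_num

lemma ffill_cons_nz (last x : Int) (xs : List Int) (hx : x ≠ 0) :
    ffill last (x :: xs) = x :: ffill x xs := by rw [ffill]; simp [hx]

-- Anchor list (proof-only): positions (from s) and values of the nonzero cells.
def aF (s : Int) : List Int → List (Int × Int)
  | [] => []
  | x :: xs => if x = 0 then aF (s + 1) xs else (s, x) :: aF (s + 1) xs

lemma aF_filter (xs : List Int) : ∀ s : Int,
    (PySem.List.enumerate xs s).filter (fun q => q.2 != 0) = aF s xs := by
  induction xs with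
  | nil => intro s; simp [PySem.List.enumerate_nil, aF]
  | cons x xs ih =>
    intro s
    by_cases hx : x = 0 <;>
      simp [PySem.List.enumerate_cons, aF, hx, ih]

lemma aF_fst_lb (xs : List Int) : ∀ (s : Int) (q : Int × Int), q ∈ aF s xs → s ≤ q.1 := by
  induction xs with
  | nil => intro s q h; simp [aF] at h
  | cons x xs ih =>
    intro s q h
    by_cases hx : x = 0
    · simp [aF, hx] at h
      have := ih (s + 1) q h; omega
    · simp [aF, hx] at h
      rcases h with h | h
      · subst h; simp
      · have := ih (s + 1) q h; omega

lemma aF_cons_zero (xs : List Int) (k : Nat) :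
    aF (k : Int) ((0 : Int) :: xs) = aF ((k + 1 : Nat) : Int) xs := by
  rw [aF]; norm_num

lemma aF_cons_nz (xs : List Int) (k : Nat) (x : Int) (hx : x ≠ 0) :
    aF (k : Int) (x :: xs) = ((k : Int), x) :: aF ((k + 1 : Nat) : Int) xs := by
  rw [aF]; simp [hx]

-- B's segment construction, generalized over the offset k: it equals ffill.
lemma segs_eq (xs : List Int) : ∀ (k : Nat) (v : Int),
    (List.replicate ((((aF (k : Int) xs).map Prod.fst).headD ((k + xs.length : Nat) : Int)).toNat - k) v)
    ++ ((aF (k : Int) xs).zip (((aF (k : Int) xs).map Prod.fst).drop 1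
          ++ [((k + xs.length : Nat) : Int)])).flatMap
         (fun qn => List.replicate (qn.2 - qn.1.1).toNat qn.1.2)
    = ffill v xs := by
  induction xs with
  | nil => intro k v; simp [aF, ffill]
  | cons x xs ih =>
    intro k v
    have hlen : (k + (x :: xs).length : Nat) = ((k + 1) + xs.length : Nat) := by
      simp; omega
    by_cases hx : x = 0
    · subst hx
      rw [aF_cons_zero, hlen, ffill_cons_zero]
      have IH := ih (k + 1) v
      rcases hA : aF ((k + 1 : Nat) : Int) xs with _ | ⟨q, A'⟩ <;> rw [hA] at IH
      · simp only [List.zip_nil_left, List.flatMap_nil, List.append_nil,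
          List.map_nil, List.drop_nil, List.headD_nil] at IH ⊢
        have h1 : ((((k + 1 + xs.length : Nat)) : Int)).toNat - k
            = (((((k + 1 + xs.length : Nat)) : Int)).toNat - (k + 1)) + 1 := by omega
        rw [h1, List.replicate_succ, ← IH]
      · have hq := aF_fst_lb xs ((k + 1 : Nat) : Int) q (by rw [hA]; exact List.mem_cons_self)
        simp only [List.map_cons, List.headD_cons] at IH ⊢
        have h1 : q.1.toNat - k = (q.1.toNat - (k + 1)) + 1 := by omega
        rw [h1, List.replicate_succ, List.cons_append, IH]
    · rw [aF_cons_nz xs k x hx, hlen, ffill_cons_nz v x xs hx]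
      have IH := ih (k + 1) x
      have hknn : ((k : Int)).toNat - k = 0 := by omega
      rcases hA : aF ((k + 1 : Nat) : Int) xs with _ | ⟨q, A'⟩ <;> rw [hA] at IH
      · simp only [List.map_nil, List.drop_nil, List.nil_append, List.zip_nil_left,
          List.flatMap_nil, List.append_nil, List.map_cons, List.drop_one, List.tail_cons,
          List.headD_nil, List.headD_cons,
          List.zip_cons_cons, List.zip_nil_right, List.flatMap_cons] at IH ⊢
        rw [hknn]
        simp only [List.replicate_zero, List.nil_append]
        have h1 : ((((k + 1 + xs.length : Nat)) : Int) - (k : Int)).toNat = xs.length + 1 := by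
          omega
        rw [h1, List.replicate_succ]
        have h2 : (((k + 1 + xs.length : Nat) : Int)).toNat - (k + 1) = xs.length := by omega
        rw [h2] at IH
        rw [IH]
      · have hq := aF_fst_lb xs ((k + 1 : Nat) : Int) q (by rw [hA]; exact List.mem_cons_self)
        simp only [List.map_cons, List.drop_one, List.tail_cons, List.cons_append,
          List.zip_cons_cons, List.headD_cons, List.flatMap_cons] at IH ⊢
        rw [hknn]
        simp only [List.replicate_zero, List.nil_append]
        have h1 : (q.1 - (k : Int)).toNat = (q.1.toNat - (k + 1)) + 1 := by omega
        rw [h1, List.replicate_succ, List.cons_append, IH]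

-- A's loop body as a named function (proof-only; definitionally the port's lambda).
def stepA (s : List Int × Option Int) (i : Int) : List Int × Option Int :=
  if PySem.List.pyGetD s.1 i 0 ≠ 0 then (s.1, some (PySem.List.pyGetD s.1 i 0))
  else match s.2 with
    | some lv => (PySem.List.pySetD s.1 i lv, s.2)
    | none => s

-- A's fill loop, generalized over the start index: it equals take/ffill/drop.
lemma fillA_eq (m : Nat) : ∀ (ys : List Int) (k : Nat) (last : Option Int),
    ys.length - k = m → k ≤ ys.length →
    ((PySem.List.pyRange (k : Int) (ys.length : Int) 1).foldl stepA (ys, last)).1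
    = ys.take k ++ ffill (last.getD 0) (ys.drop k) := by
  induction m with
  | zero =>
    intro ys k last hm hk
    have hk' : k = ys.length := by omega
    subst hk'
    rw [PySem.List.pyRange_one_eq_nil (by omega)]
    simp [ffill]
  | succ m ih =>
    intro ys k last hm hk
    have hklt : k < ys.length := by omega
    rw [PySem.List.pyRange_one_cons (by exact_mod_cast hklt), List.foldl_cons]
    have hget : PySem.List.pyGetD ys (k : Int) 0 = ys[k] := by
      rw [PySem.List.pyGetD_natCast, List.getD_eq_getElem?_getD, List.getElem?_eq_getElem hklt]
      rfl
    have hdrop : ys.drop k = ys[k] :: ys.drop (k + 1) := List.drop_eq_getElem_cons hklt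
    have hcast : ((k : Int) + 1) = ((k + 1 : Nat) : Int) := by push_cast; ring
    by_cases hz : ys[k] = 0
    · cases last with
      | none =>
        have hstep : stepA (ys, none) (k : Int) = (ys, none) := by
          simp [stepA, hget, hz]
        have htake : ys.take (k + 1) = ys.take k ++ [ys[k]] := by
          rw [List.take_add_one, List.getElem?_eq_getElem hklt]; rfl
        rw [hstep, hcast, ih ys (k + 1) none (by omega) (by omega)]
        rw [hdrop, hz, ffill_cons_zero, htake, List.append_assoc, hz]
        rfl
      | some lv =>
        have hstep : stepA (ys, some lv) (k : Int) = (ys.set k lv, some lv) := by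
          simp [stepA, hget, hz]
        rw [hstep, hcast]
        rw [show ((ys.length : Int)) = (((ys.set k lv).length : Int)) by simp]
        rw [ih (ys.set k lv) (k + 1) (some lv) (by simp; omega) (by simp; omega)]
        rw [List.drop_set_of_lt (by omega : k < k + 1)]
        have htake : (ys.set k lv).take (k + 1) = ys.take k ++ [lv] := by
          rw [List.take_add_one, List.getElem?_eq_getElem (by simpa using hklt),
            List.getElem_set_self, List.take_set,
            List.set_eq_of_length_le (by simp)]
          rfl
        rw [hdrop, hz, ffill_cons_zero, htake, List.append_assoc]
        rfl
    · have hstep : stepA (ys, last) (k : Int) = (ys, some ys[k]) := by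
        simp [stepA, hget, hz]
      rw [hstep, hcast, ih ys (k + 1) (some ys[k]) (by omega) (by omega)]
      have htake : ys.take (k + 1) = ys.take k ++ [ys[k]] := by
        rw [List.take_add_one, List.getElem?_eq_getElem hklt]; rfl
      rw [hdrop, ffill_cons_nz _ _ _ hz, htake, List.append_assoc]
      rfl

-- The scatter loop never changes the length of the target list.
lemma scatter_len (g : Int × Int → Int) (h : Int × Int → Int) :
    ∀ (l : List (Int × Int)) (pv : List Int),
      (l.foldl (fun pv ie => PySem.List.pySetD pv (g ie) (h ie)) pv).length = pv.length := by
  intro l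
  induction l with
  | nil => intro pv; rfl
  | cons a l ih =>
    intro pv
    rw [List.foldl_cons, ih, PySem.List.length_pySetD]

-- B's leading-zeros count, written as the port writes it vs. as segs_eq states it.
lemma match_headD (A : List (Int × Int)) (L : Int) :
    (match A with | [] => L.toNat | q :: _ => q.1.toNat)
      = ((A.map Prod.fst).headD L).toNat := by
  cases A <;> simp

-- ===== VERDICT (by name: the statement is the Claim_ definition above) =====
theorem forward_fill_spec : Claim_equal_forward_fill := by
  intro n p _hdom hpre
  obtain ⟨hne, hlen, hbnd⟩ := hpre
  unfold Spec_forward_fill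
  obtain ⟨a, t, rfl⟩ : ∃ a t, n = a :: t := by
    cases n with
    | nil => exact absurd rfl hne
    | cons a t => exact ⟨a, t, rfl⟩
  have h0 : PySem.List.pyGet? (a :: t) 0 = some a := PySem.List.pyGet?_zero_cons a t
  have hgl : (a :: t).getLast? = some ((a :: t).getLastD 0) := by
    cases h : (a :: t).getLast? with
    | none => simp at h
    | some x => rw [List.getLastD_eq_getLast?, h]; rfl
  have h1 : PySem.List.pyGet? (a :: t) (-1) = some ((a :: t).getLastD 0) := by
    rw [PySem.List.pyGet?_neg_one, hgl]
  simp only [forward_fill, forward_fill_alt, h0, h1, Prod.mk.injEq]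
  refine ⟨trivial, ?_⟩
  set e := (a :: t).getLastD 0 with he
  set L : Int := e - a + 1 with hLdef
  set scat : List Int := List.foldl
    (fun pv ie => PySem.List.pySetD pv (ie.2 - a) (PySem.List.pyGetD p ie.1 0))
    (List.replicate L.toNat 0) (PySem.List.enumerate (a :: t) 0) with hscat
  have hae : a ≤ e := by simpa using (hbnd a List.mem_cons_self).2
  have hslen : scat.length = L.toNat := by
    rw [hscat, scatter_len]; simp
  have hLs : L = ((scat.length : Nat) : Int) := by rw [hslen]; omega
  have hfun : (fun (s : List Int × Option Int) (i : Int) =>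
      if PySem.List.pyGetD s.1 i 0 ≠ 0 then (s.1, some (PySem.List.pyGetD s.1 i 0))
      else match s.2 with
        | some lv => (PySem.List.pySetD s.1 i lv, s.2)
        | none => s) = stepA := rfl
  rw [hfun]
  have hA := fillA_eq scat.length scat 0 none (by omega) (by omega)
  simp only [Nat.cast_zero, List.take_zero, List.drop_zero, List.nil_append,
    Option.getD_none] at hA
  rw [hLs, hA]
  rw [aF_filter scat 0, PySem.List.foldl_append_eq_flatMap, match_headD]
  have hB := segs_eq scat 0 0
  simp only [Nat.cast_zero, Nat.zero_add, Nat.sub_zero] at hB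
  exact hB.symm
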